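-- pv_equiv track=rewrite | github.com/Koval-16/niduc | voting_algorithm.py | plurality_with_tolerance
-- ===== SOURCE A (Python) =====
-- def plurality_with_tolerance(values, tolerance):
--     if not values: return None
--     votes = {val: 0 for val in values}
--     for val in values:
--         for candidate in values:
--             if abs(val - candidate) <= tolerance:
--                 votes[candidate] += 1
--     max_votes = max(votes.values())
--     candidates = [val for val, count in votes.items() if count == max_votes]
--     return candidates[0]
-- ===== SOURCE B (Python) =====
-- def plurality_with_tolerance(values, tolerance):
--     if not values:
--         return None
--     counts = {}
--     for v in values:
--         counts[v] = counts.get(v, 0) + 1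
--     items = list(counts.items())
--     best, best_votes = None, -1
--     for v, c in items:
--         votes = c * sum(cu for u, cu in items if abs(u - v) <= tolerance)
--         if votes > best_votes:
--             best, best_votes = v, votes
--     return best
-- ===== Notes on version B (the rewrite author's own statement) =====
-- stated objective: faster
-- what changed: B builds a frequency table of the distinct values once and computes each candidate's votes as multiplicity(v) * sum of multiplicities of distinct values within tolerance, replacing A's O(n^2) double loop over all vote occurrences incrementing a dict; the winner is picked by a single running-argmax pass instead of max()+filter+[0].
import Mathlib
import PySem

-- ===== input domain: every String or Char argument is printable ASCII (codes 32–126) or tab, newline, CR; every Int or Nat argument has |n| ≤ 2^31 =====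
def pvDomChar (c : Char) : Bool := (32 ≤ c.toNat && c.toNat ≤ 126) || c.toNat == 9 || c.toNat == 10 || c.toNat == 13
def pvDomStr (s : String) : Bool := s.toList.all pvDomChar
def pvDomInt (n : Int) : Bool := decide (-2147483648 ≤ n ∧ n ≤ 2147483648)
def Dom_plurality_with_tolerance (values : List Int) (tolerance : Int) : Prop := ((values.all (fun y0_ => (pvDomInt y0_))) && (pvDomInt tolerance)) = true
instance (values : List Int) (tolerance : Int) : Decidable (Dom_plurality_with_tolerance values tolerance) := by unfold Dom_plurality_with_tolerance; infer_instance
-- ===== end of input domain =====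

-- B replaces A's O(n^2) double loop over vote occurrences by a frequency table built once
-- (votes of a candidate = its multiplicity × sum of multiplicities of distinct values within
-- tolerance) and a single running-argmax pass instead of max()+filter; same result, proved equal.

-- ===== PORT A =====
def plurality_with_tolerance (values : List Int) (tolerance : Int) : Option Int :=
  match values with
  | [] => none
  | _ :: _ =>
    -- votes = {val: 0 for val in values}
    let votes0 : PySem.Dict Int Int :=
      values.foldl (fun d val => d.insert val 0) PySem.Dict.empty
    -- nested loop; votes[candidate] += 1 : key always present (candidate ∈ values), so
    -- Dict.modify (whose default 0 is never used) is exact here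
    let votes : PySem.Dict Int Int :=
      values.foldl (fun d val =>
        values.foldl (fun d candidate =>
          if |val - candidate| ≤ tolerance then d.modify candidate 0 (· + 1) else d) d) votes0
    match PySem.List.max? votes.values (fun x => x) with
    | none => none  -- max() on an empty sequence raises; unreachable since values ≠ []
    | some max_votes =>
      let candidates := (votes.items.filter (fun p => p.2 == max_votes)).map (fun p => p.1)
      PySem.List.pyGet? candidates 0

-- ===== PORT B =====
def plurality_with_tolerance_alt (values : List Int) (tolerance : Int) : Option Int :=
  match values with
  | [] => none
  | _ :: _ =>
    -- counts[v] = counts.get(v, 0) + 1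
    let counts : PySem.Dict Int Int :=
      values.foldl (fun d v => d.insert v (d.getD v 0 + 1)) PySem.Dict.empty
    let items := counts.items
    -- running argmax (strict improvement keeps the first maximum)
    let res :=
      items.foldl (fun (acc : Option Int × Int) p =>
        let votes := p.2 * ((items.filter (fun q => |q.1 - p.1| ≤ tolerance)).map (fun q => q.2)).sum
        if votes > acc.2 then (some p.1, votes) else acc) (none, -1)
    res.1

-- ===== PRECONDITION & SPEC =====
def Spec_plurality_with_tolerance (values : List Int) (tolerance : Int) (out : Option Int) : Prop := out = plurality_with_tolerance_alt values tolerance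
instance (values : List Int) (tolerance : Int) (out : Option Int) : Decidable (Spec_plurality_with_tolerance values tolerance out) := by unfold Spec_plurality_with_tolerance; infer_instance

-- ===== CLAIM (what is proved, stated in full; the proofs are below) =====
def Claim_equal_plurality_with_tolerance : Prop := ∀ (values : List Int) (tolerance : Int), Dom_plurality_with_tolerance values tolerance → Spec_plurality_with_tolerance values tolerance (plurality_with_tolerance values tolerance)

-- ===== LEMMAS AND PROOFS =====

-- a loop whose body acts only when p x holds is the loop over the filtered list
theorem pv_foldl_ite_filter {α β : Type} (p : α → Prop) [DecidablePred p] (g : β → α → β) :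
    ∀ (l : List α) (d : β),
      (l.foldl (fun d x => if p x then g d x else d) d) =
        ((l.filter (fun x => decide (p x))).foldl g d) := by
  intro l
  induction l with
  | nil => intro d; rfl
  | cons x t ih =>
    intro d
    by_cases hx : p x <;> simp [List.filter, hx, ih]

-- the dict-comprehension {val: 0 …} has every stored value 0
theorem pv_votes0_getD (l : List Int) :
    ∀ (d : PySem.Dict Int Int), (∀ k, d.getD k 0 = 0) →
      ∀ k, (l.foldl (fun d v => d.insert v 0) d).getD k 0 = 0 := by
  induction l with
  | nil => intro d h k; exact h k
  | cons x t ih =>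
    intro d h k
    refine ih _ (fun k' => ?_) k
    rw [PySem.Dict.getD_insert]
    split <;> simp [h]

-- Set.update by elements already present does nothing
theorem pv_set_update_of_mem (s : PySem.Set Int) (l : List Int)
    (h : ∀ x ∈ l, x ∈ s) : PySem.Set.update s l = s := by
  rw [PySem.Set.update_eq_append_filter]
  have : (PySem.Set.ofList l).filter (fun y => !s.contains y) = [] := by
    rw [List.filter_eq_nil_iff]
    intro a ha
    have ha' : a ∈ s := h a ((PySem.Set.mem_ofList l a).mp ha)
    simpa using ha'
  rw [this, List.append_nil]

-- count inside a filtered list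
theorem pv_count_filter (q : Int → Bool) (v : Int) (l : List Int) :
    (l.filter q).count v = if q v then l.count v else 0 := by
  by_cases h : q v = true
  · simp [h, List.count_filter h]
  · simp only [Bool.not_eq_true] at h
    simp [h, List.count_eq_zero]

-- sum of an indicator-weighted constant
theorem pv_sum_ite (p : Int → Prop) [DecidablePred p] (c : Int) :
    ∀ (l : List Int),
      (l.map (fun x => if p x then c else 0)).sum = (l.countP (fun x => decide (p x)) : Int) * c := by
  intro l
  induction l with
  | nil => simp
  | cons x t ih =>
    by_cases hx : p x <;> simp [hx, ih] <;> ring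

-- CORE: summing multiplicities over the distinct values satisfying q = countP q over values
theorem pv_sum_counts_filter (q : Int → Bool) (l : List Int) :
    (((PySem.Set.ofList l).filter q).map (fun u => (l.count u : Int))).sum
      = (l.countP q : Int) := by
  have hperm : (PySem.Set.ofList l).Perm l.dedup := by
    rw [List.perm_ext_iff_of_nodup (PySem.Set.nodup_ofList l) l.nodup_dedup]
    intro a; rw [PySem.Set.mem_ofList, List.mem_dedup]
  have h2 : (((PySem.Set.ofList l).filter q).map (fun u => (l.count u : Int))).sum
      = ((l.dedup.filter q).map (fun u => (l.count u : Int))).sum :=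
    (((hperm.filter q)).map _).sum_eq
  rw [h2]
  have h3 := List.sum_map_count_dedup_filter_eq_countP q l
  calc ((l.dedup.filter q).map (fun u => (l.count u : Int))).sum
      = (((l.dedup.filter q).map (fun u => l.count u)).map (fun n : Nat => (n : Int))).sum := by
        rw [List.map_map]; rfl
    _ = (((l.dedup.filter q).map (fun u => l.count u)).sum : Int) := (Nat.cast_list_sum _).symm
    _ = (l.countP q : Int) := by rw [h3]

-- running strict-argmax fold: first component is the first element reaching the max
theorem pv_G_fst (l : List (Int × Int)) :
    ∀ (b : Option Int) (bv : Int),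
      (l.foldl (fun acc p => if p.2 > acc.2 then (some p.1, p.2) else acc) (b, bv)).1
        = if bv < (l.map (fun p => p.2)).foldl max bv then
            (l.find? (fun p => p.2 == (l.map (fun p => p.2)).foldl max bv)).map (fun p => p.1)
          else b := by
  induction l with
  | nil => intro b bv; simp
  | cons x t ih =>
    intro b bv
    by_cases hx : x.2 > bv
    · simp only [List.foldl_cons, List.map_cons, if_pos hx]
      rw [max_eq_right (le_of_lt hx)]
      by_cases hM : x.2 < (t.map (fun p => p.2)).foldl max x.2
      · rw [ih]
        have hne : ((t.map (fun p => p.2)).foldl max x.2 == x.2) = false := by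
          simp; omega
        rw [if_pos hM, List.find?_cons, Bool.beq_comm, hne]
        rw [if_pos (lt_trans hx hM)]
      · rw [ih, if_neg hM]
        have hM' : (t.map (fun p => p.2)).foldl max x.2 = x.2 :=
          le_antisymm (Int.not_lt.mp hM) (PySem.List.le_foldl_max _ _).1
        rw [if_pos (by omega : bv < (t.map (fun p => p.2)).foldl max x.2)]
        rw [List.find?_cons, Bool.beq_comm, hM']
        simp
    · simp only [List.foldl_cons, List.map_cons, if_neg hx]
      rw [max_eq_left (le_of_not_gt hx), ih]
      by_cases hM : bv < (t.map (fun p => p.2)).foldl max bv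
      · have hne : ((t.map (fun p => p.2)).foldl max bv == x.2) = false := by
          have : x.2 ≤ bv := le_of_not_gt hx
          simp; omega
        rw [if_pos hM, if_pos hM, List.find?_cons, Bool.beq_comm, hne]
      · rw [if_neg hM, if_neg hM]

-- the outer loop of A, per key: each pass over val adds count of v in the filtered candidates
theorem pv_outer_getD (values : List Int) (tolerance : Int) (v : Int) :
    ∀ (L : List Int) (d : PySem.Dict Int Int),
      (L.foldl (fun d val =>
          (values.filter (fun c => decide (|val - c| ≤ tolerance))).foldl
            (fun d c => d.modify c 0 (· + 1)) d) d).getD v 0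
        = d.getD v 0
          + (L.map (fun val =>
              ((values.filter (fun c => decide (|val - c| ≤ tolerance))).count v : Int))).sum := by
  intro L
  induction L with
  | nil => intro d; simp
  | cons x t ih =>
    intro d
    simp only [List.foldl_cons, List.map_cons, List.sum_cons]
    rw [ih, PySem.Dict.getD_foldl_modify_add_one]
    ring

-- the outer loop of A never changes the key list (every touched key is already present)
theorem pv_outer_keys (values : List Int) (tolerance : Int) :
    ∀ (L : List Int) (d : PySem.Dict Int Int), (∀ x ∈ values, x ∈ d.keys) →
      (L.foldl (fun d val =>
          (values.filter (fun c => decide (|val - c| ≤ tolerance))).foldl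
            (fun d c => d.modify c 0 (· + 1)) d) d).keys = d.keys := by
  intro L
  induction L with
  | nil => intro d _; rfl
  | cons x t ih =>
    intro d h
    simp only [List.foldl_cons]
    have hstep : ((values.filter (fun c => decide (|x - c| ≤ tolerance))).foldl
        (fun d c => d.modify c 0 (· + 1)) d).keys = d.keys := by
      rw [PySem.Dict.keys_foldl_modify]
      exact pv_set_update_of_mem _ _ (fun y hy => h y (List.mem_of_mem_filter hy))
    rw [ih _ (fun y hy => by rw [hstep]; exact h y hy), hstep]

-- A's vote dictionary, characterised: keys = distinct values in first-occurrence order,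
-- value at u = countP (|·-u| ≤ tol) · multiplicity u
theorem pv_A_items (values : List Int) (tolerance : Int) :
    (values.foldl (fun d val =>
        values.foldl (fun d candidate =>
          if |val - candidate| ≤ tolerance then d.modify candidate 0 (· + 1) else d) d)
      (values.foldl (fun d val => d.insert val 0) PySem.Dict.empty)).items
    = (PySem.Set.ofList values).map (fun u =>
        (u, (values.countP (fun x => decide (|x - u| ≤ tolerance)) : Int) * (values.count u : Int))) := by
  -- the inner conditional loop is the loop over the filtered candidate list
  have hfun : (fun (d : PySem.Dict Int Int) val =>
      values.foldl (fun d candidate =>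
        if |val - candidate| ≤ tolerance then d.modify candidate 0 (· + 1) else d) d)
    = (fun (d : PySem.Dict Int Int) val =>
      (values.filter (fun c => decide (|val - c| ≤ tolerance))).foldl
        (fun d c => d.modify c 0 (· + 1)) d) := by
    funext d val
    exact pv_foldl_ite_filter _ _ values d
  rw [hfun]
  -- the initial dict {val: 0 …}
  have hkeys0 : (values.foldl (fun d val => d.insert val (0:Int)) PySem.Dict.empty).keys
      = PySem.Set.ofList values := by
    rw [PySem.Dict.keys_foldl_insert values (fun _ _ => 0) PySem.Dict.empty,
        PySem.Dict.keys_empty, PySem.Set.update_nil_left]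
  have hnd0 : (values.foldl (fun d val => d.insert val (0:Int)) PySem.Dict.empty).keys.Nodup :=
    PySem.Dict.nodup_keys_foldl_insert values (fun _ _ => 0) PySem.Dict.empty
      PySem.Dict.nodup_keys_empty
  have hgetD0 : ∀ k, (values.foldl (fun d val => d.insert val (0:Int)) PySem.Dict.empty).getD k 0 = 0 :=
    pv_votes0_getD values PySem.Dict.empty (fun k => PySem.Dict.getD_empty k 0)
  -- keys of the final dict
  have hmem : ∀ x ∈ values,
      x ∈ (values.foldl (fun d val => d.insert val (0:Int)) PySem.Dict.empty).keys := by
    intro x hx; rw [hkeys0]; exact (PySem.Set.mem_ofList values x).mpr hx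
  have hkeysF := pv_outer_keys values tolerance values _ hmem
  have hndF : (values.foldl (fun d val =>
      (values.filter (fun c => decide (|val - c| ≤ tolerance))).foldl
        (fun d c => d.modify c 0 (· + 1)) d)
      (values.foldl (fun d val => d.insert val (0:Int)) PySem.Dict.empty)).keys.Nodup := by
    rw [hkeysF]; exact hnd0
  rw [PySem.Dict.items_eq_map_keys _ hndF 0, hkeysF, hkeys0]
  refine List.map_congr_left (fun u _ => ?_)
  have hval := pv_outer_getD values tolerance u values
    (values.foldl (fun d val => d.insert val (0:Int)) PySem.Dict.empty)
  rw [hval, hgetD0 u, zero_add]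
  have hterm : (values.map (fun val =>
      ((values.filter (fun c => decide (|val - c| ≤ tolerance))).count u : Int)))
      = values.map (fun val => if |val - u| ≤ tolerance then (values.count u : Int) else 0) := by
    refine List.map_congr_left (fun val _ => ?_)
    rw [pv_count_filter]
    split <;> simp_all
  rw [hterm, pv_sum_ite (fun val => |val - u| ≤ tolerance) _ values]

-- values[0] of a list is its head
theorem pv_pyGet0 {α : Type} (l : List α) : PySem.List.pyGet? l 0 = l.head? := by
  cases l <;> simp [PySem.List.pyGet?, PySem.List.pyIdx?]

-- max()+filter+[0] (A's tail) picks the same element as the running strict argmax (B's tail)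
theorem pv_tail (I : List (Int × Int)) (hne : I ≠ []) (hnn : ∀ p ∈ I, 0 ≤ p.2) :
    (match PySem.List.max? (I.map (fun p => p.2)) (fun x => x) with
     | none => none
     | some M => PySem.List.pyGet? ((I.filter (fun p => p.2 == M)).map (fun p => p.1)) 0)
    = (I.foldl (fun acc p => if p.2 > acc.2 then (some p.1, p.2) else acc)
        ((none : Option Int), (-1 : Int))).1 := by
  obtain ⟨p0, t, rfl⟩ : ∃ p0 t, I = p0 :: t := by
    cases I with
    | nil => exact absurd rfl hne
    | cons a b => exact ⟨a, b, rfl⟩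
  have h0 : (0 : Int) ≤ p0.2 := hnn p0 (List.mem_cons_self ..)
  have hmax : PySem.List.max? ((p0 :: t).map (fun p => p.2)) (fun x => x)
      = some ((t.map (fun p => p.2)).foldl max p0.2) := by
    rw [List.map_cons, PySem.List.max?_id_cons]
  rw [hmax]
  have hM' : ((p0 :: t).map (fun p => p.2)).foldl max (-1)
      = (t.map (fun p => p.2)).foldl max p0.2 := by
    rw [List.map_cons, List.foldl_cons, max_eq_right (by omega : (-1:Int) ≤ p0.2)]
  have hMle : p0.2 ≤ (t.map (fun p => p.2)).foldl max p0.2 :=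
    (PySem.List.le_foldl_max _ _).1
  rw [pv_G_fst, hM', if_pos (by omega : (-1:Int) < (t.map (fun p => p.2)).foldl max p0.2)]
  simp only [pv_pyGet0, List.head?_map, List.head?_filter]

-- folding with a per-item computed vote = running argmax over the (key, vote) pairs
theorem pv_fold_votes (L : List (Int × Int)) (vf : Int × Int → Int) :
    L.foldl (fun acc p => if vf p > acc.2 then (some p.1, vf p) else acc)
        ((none : Option Int), (-1 : Int))
      = (L.map (fun p => (p.1, vf p))).foldl
          (fun acc p => if p.2 > acc.2 then (some p.1, p.2) else acc)
          ((none : Option Int), (-1 : Int)) := by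
  rw [List.foldl_map]

theorem plurality_main (values : List Int) (tolerance : Int) :
    plurality_with_tolerance values tolerance = plurality_with_tolerance_alt values tolerance := by
  cases values with
  | nil => rfl
  | cons v vs =>
    simp only [plurality_with_tolerance, plurality_with_tolerance_alt, PySem.Dict.values]
    have hA := pv_A_items (v :: vs) tolerance
    have hB : (List.foldl (fun (d : PySem.Dict Int Int) x => d.insert x (d.getD x 0 + 1))
        PySem.Dict.empty (v :: vs)).items
        = (PySem.Set.ofList (v :: vs)).map (fun k => (k, ((v :: vs).count k : Int))) := by
      rw [PySem.Dict.foldl_insert_getD_add_one_eq_counter, PySem.Dict.items_counter]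
    rw [hA, hB]
    -- B's fold over the counter items, with the vote value computed per item, is the
    -- running-argmax fold over A's items list
    have hmapeq : ((PySem.Set.ofList (v :: vs)).map (fun k => (k, ((v :: vs).count k : Int)))).map
          (fun p => (p.1, p.2 *
            (((((PySem.Set.ofList (v :: vs)).map (fun k => (k, ((v :: vs).count k : Int)))).filter
                (fun q => |q.1 - p.1| ≤ tolerance)).map (fun q => q.2)).sum)))
        = (PySem.Set.ofList (v :: vs)).map (fun u =>
            (u, ((v :: vs).countP (fun x => decide (|x - u| ≤ tolerance)) : Int)
                  * ((v :: vs).count u : Int))) := by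
      rw [List.map_map]
      refine List.map_congr_left (fun u _ => ?_)
      simp only [Function.comp]
      have hfil : (((PySem.Set.ofList (v :: vs)).map
            (fun k => (k, ((v :: vs).count k : Int)))).filter
              (fun q => |q.1 - u| ≤ tolerance)).map (fun q => q.2)
          = ((PySem.Set.ofList (v :: vs)).filter (fun x => decide (|x - u| ≤ tolerance))).map
              (fun k => ((v :: vs).count k : Int)) := by
        rw [List.filter_map, List.map_map]
        rfl
      rw [hfil, pv_sum_counts_filter]
      rw [Int.mul_comm]
    rw [pv_fold_votes ((PySem.Set.ofList (v :: vs)).map (fun k => (k, ((v :: vs).count k : Int))))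
        (fun p => p.2 *
          (((((PySem.Set.ofList (v :: vs)).map (fun k => (k, ((v :: vs).count k : Int)))).filter
              (fun q => |q.1 - p.1| ≤ tolerance)).map (fun q => q.2)).sum))]
    rw [hmapeq]
    refine pv_tail _ ?_ ?_
    · simp [PySem.Set.ofList_cons]
    · intro p hp
      obtain ⟨u, _, rfl⟩ := List.mem_map.mp hp
      positivity


-- ===== VERDICT (by name: the statement is the Claim_ definition above) =====
theorem plurality_with_tolerance_spec : Claim_equal_plurality_with_tolerance := by
  intro values tolerance _
  unfold Spec_plurality_with_tolerance
  exact plurality_main values tolerance
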